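-- pv_equiv track=rewrite | github.com/dreamtides/dreamtides | scripts/rebalance/rebalance.py | parse_card_blocks
-- ===== SOURCE A (Python) =====
-- def parse_card_blocks(text):
--     """Parse a TOML file into blocks, each block is one [[cards]] entry.
--     Returns list of (start_line, end_line, card_dict, raw_lines)."""
--     lines = text.split("\n")
--     blocks = []
--     current_start = None
--     current_lines = []
--
--     for i, line in enumerate(lines):
--         if line.strip() == "[[cards]]":
--             if current_start is not None:
--                 blocks.append((current_start, i - 1, current_lines))
--             current_start = i
--             current_lines = [line]
--         elif current_start is not None:
--             current_lines.append(line)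
--
--     if current_start is not None:
--         blocks.append((current_start, len(lines) - 1, current_lines))
--
--     return blocks
-- ===== SOURCE B (Python) =====
-- def parse_card_blocks(text):
--     """Two-pass: collect [[cards]] header indices, then emit each block as a slice."""
--     lines = text.split("\n")
--     headers = [i for i, line in enumerate(lines) if line.strip() == "[[cards]]"]
--     blocks = []
--     for start, nxt in zip(headers, headers[1:] + [len(lines)]):
--         blocks.append((start, nxt - 1, lines[start:nxt]))
--     return blocks
-- ===== Notes on version B (the rewrite author's own statement) =====
-- stated objective: alternative
-- what changed: Replaced A's single stateful scan (current_start/current_lines accumulators) by a two-pass decomposition: first collect the [[cards]] header indices, then emit each block as a slice between consecutive headers.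
import Mathlib
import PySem

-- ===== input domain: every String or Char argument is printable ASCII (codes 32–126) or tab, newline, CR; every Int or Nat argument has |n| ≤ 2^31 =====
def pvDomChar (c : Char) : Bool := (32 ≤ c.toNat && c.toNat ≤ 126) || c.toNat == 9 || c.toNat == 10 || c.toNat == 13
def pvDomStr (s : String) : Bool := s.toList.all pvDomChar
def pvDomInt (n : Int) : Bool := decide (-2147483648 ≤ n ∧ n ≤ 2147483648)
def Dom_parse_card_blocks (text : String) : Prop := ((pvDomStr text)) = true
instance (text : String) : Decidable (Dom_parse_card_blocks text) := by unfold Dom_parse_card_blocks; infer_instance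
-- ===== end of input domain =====

-- B replaces A's single accumulating scan by a header-index table plus a slice-emission pass (alternative decomposition, same cost).

-- ===== PORT A =====
-- loop body of A's for-loop (state = (blocks, current_start, current_lines))
def pvStepA (st : List (Int × Int × List String) × Option Int × List String)
    (p : Int × String) : List (Int × Int × List String) × Option Int × List String :=
  if PySem.Str.strip p.2 == "[[cards]]" then
    (match st.2.1 with
     | some s => st.1 ++ [(s, p.1 - 1, st.2.2)]
     | none => st.1,
     some p.1, [p.2])
  else
    match st.2.1 with
    | some _ => (st.1, st.2.1, st.2.2 ++ [p.2])
    | none => st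

def parse_card_blocks (text : String) : List (Int × Int × List String) :=
  -- text.split("\n"): sep "\n" ≠ "", so split? is always some (exact)
  let lines := (PySem.Str.split? text "\n").getD []
  let st := (PySem.List.enumerate lines 0).foldl pvStepA ([], none, [])
  match st.2.1 with
  | some s => st.1 ++ [(s, (lines.length : Int) - 1, st.2.2)]
  | none => st.1

-- ===== PORT B =====
def parse_card_blocks_alt (text : String) : List (Int × Int × List String) :=
  let lines := (PySem.Str.split? text "\n").getD []
  let headers := ((PySem.List.enumerate lines 0).filter
      (fun p => PySem.Str.strip p.2 == "[[cards]]")).map (·.1)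
  (headers.zip (headers.drop 1 ++ [(lines.length : Int)])).foldl
    (fun blocks p =>
      blocks ++ [(p.1, p.2 - 1, PySem.List.slice lines (some p.1) (some p.2))]) []

-- ===== PRECONDITION & SPEC =====
def Spec_parse_card_blocks (text : String) (out : List (Int × Int × List String)) : Prop := out = parse_card_blocks_alt text
instance (text : String) (out : List (Int × Int × List String)) : Decidable (Spec_parse_card_blocks text out) := by unfold Spec_parse_card_blocks; infer_instance

-- ===== CLAIM (what is proved, stated in full; the proofs are below) =====
def Claim_equal_parse_card_blocks : Prop := ∀ (text : String), Dom_parse_card_blocks text → Spec_parse_card_blocks text (parse_card_blocks text)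

-- ===== LEMMAS AND PROOFS =====

def pvHdr (l : String) : Bool := PySem.Str.strip l == "[[cards]]"

-- A's finalization step
def pvFin (n : Int) (st : List (Int × Int × List String) × Option Int × List String) :
    List (Int × Int × List String) :=
  match st.2.1 with
  | some s => st.1 ++ [(s, n - 1, st.2.2)]
  | none => st.1

-- A's loop after the first header, finalized (at the end i = total length)
def pvRunA (i s : Int) (cl : List String) : List String → List (Int × Int × List String)
  | [] => [(s, i - 1, cl)]
  | l :: ls => if pvHdr l then (s, i - 1, cl) :: pvRunA (i+1) i [l] ls
               else pvRunA (i+1) s (cl ++ [l]) ls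

-- A's loop before the first header, finalized
def pvPreA (i : Int) : List String → List (Int × Int × List String)
  | [] => []
  | l :: ls => if pvHdr l then pvRunA (i+1) i [l] ls else pvPreA (i+1) ls

def pvHdrs (i : Int) : List String → List Int
  | [] => []
  | l :: ls => if pvHdr l then i :: pvHdrs (i+1) ls else pvHdrs (i+1) ls

-- B's emission pass, recursively
def pvEmitB (lines : List String) (n : Int) : Int → List Int → List (Int × Int × List String)
  | s, [] => [(s, n - 1, PySem.List.slice lines (some s) (some n))]
  | s, h :: t => (s, h - 1, PySem.List.slice lines (some s) (some h)) :: pvEmitB lines n h t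

theorem pvFoldA_run (ls : List String) :
    ∀ (n i s : Int) (bl : List (Int × Int × List String)) (cl : List String),
    n = i + ls.length →
    pvFin n ((PySem.List.enumerate ls i).foldl pvStepA (bl, some s, cl))
      = bl ++ pvRunA i s cl ls := by
  induction ls with
  | nil =>
    intro n i s bl cl hn
    simp only [List.length_nil, Nat.cast_zero, add_zero] at hn
    subst hn
    simp [PySem.List.enumerate_nil, pvFin, pvRunA]
  | cons l ls ih =>
    intro n i s bl cl hn
    rw [PySem.List.enumerate_cons, List.foldl_cons]
    by_cases h : pvHdr l
    · have hst : pvStepA (bl, some s, cl) (i, l) = (bl ++ [(s, i - 1, cl)], some i, [l]) := by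
        simp only [pvHdr] at h; simp [pvStepA, h]
      rw [hst, ih n (i+1) i (bl ++ [(s, i - 1, cl)]) [l] (by simp at hn ⊢; omega)]
      simp [pvRunA, h]
    · have hst : pvStepA (bl, some s, cl) (i, l) = (bl, some s, cl ++ [l]) := by
        simp only [pvHdr] at h; simp [pvStepA, h]
      rw [hst, ih n (i+1) s bl (cl ++ [l]) (by simp at hn ⊢; omega)]
      simp [pvRunA, h]

theorem pvFoldA_pre (ls : List String) :
    ∀ (n i : Int) (bl : List (Int × Int × List String)) (cl : List String),
    n = i + ls.length →
    pvFin n ((PySem.List.enumerate ls i).foldl pvStepA (bl, none, cl))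
      = bl ++ pvPreA i ls := by
  induction ls with
  | nil =>
    intro n i bl cl _
    simp [PySem.List.enumerate_nil, pvFin, pvPreA]
  | cons l ls ih =>
    intro n i bl cl hn
    rw [PySem.List.enumerate_cons, List.foldl_cons]
    by_cases h : pvHdr l
    · have hst : pvStepA (bl, none, cl) (i, l) = (bl, some i, [l]) := by
        simp only [pvHdr] at h; simp [pvStepA, h]
      rw [hst, pvFoldA_run ls n (i+1) i bl [l] (by simp at hn ⊢; omega)]
      simp [pvPreA, h]
    · have hst : pvStepA (bl, none, cl) (i, l) = (bl, none, cl) := by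
        simp only [pvHdr] at h; simp [pvStepA, h]
      rw [hst, ih n (i+1) bl cl (by simp at hn ⊢; omega)]
      simp [pvPreA, h]

theorem pvHdrs_eq (ls : List String) :
    ∀ (i : Int),
    ((PySem.List.enumerate ls i).filter (fun p => PySem.Str.strip p.2 == "[[cards]]")).map (·.1)
      = pvHdrs i ls := by
  induction ls with
  | nil => intro i; simp [PySem.List.enumerate_nil, pvHdrs]
  | cons l ls ih =>
    intro i
    by_cases h : pvHdr l
    · simp only [pvHdr] at h
      simp [PySem.List.enumerate_cons, List.filter_cons, h, pvHdrs, pvHdr, ih]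
    · simp only [pvHdr] at h
      simp [PySem.List.enumerate_cons, List.filter_cons, h, pvHdrs, pvHdr, ih]

theorem pvZipFold (lines : List String) (n : Int) :
    ∀ (hs : List Int) (s : Int),
    (((s :: hs).zip (hs ++ [n])).foldl
      (fun blocks p =>
        blocks ++ [(p.1, p.2 - 1, PySem.List.slice lines (some p.1) (some p.2))]) [])
    = pvEmitB lines n s hs := by
  intro hs
  induction hs with
  | nil => intro s; simp [pvEmitB]
  | cons h t ih =>
    intro s
    have h2 := ih h
    rw [PySem.List.foldl_append_singleton_eq_map] at h2
    simp only [List.nil_append] at h2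
    simp only [List.cons_append, List.zip_cons_cons, List.foldl_cons, List.nil_append]
    rw [PySem.List.foldl_append_singleton_eq_map]
    simp [pvEmitB, h2]

theorem pvTakeSucc (lines : List String) (s i : Nat) (l : String) (ls : List String)
    (hsi : s ≤ i) (hdrop : lines.drop i = l :: ls) :
    (lines.drop s).take (i - s) ++ [l] = (lines.drop s).take (i + 1 - s) := by
  have hdd : (lines.drop s).drop (i - s) = l :: ls := by
    rw [List.drop_drop]
    have : s + (i - s) = i := by omega
    rw [this, hdrop]
  have h1 : i + 1 - s = (i - s) + 1 := by omega
  rw [h1, List.take_add, hdd]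
  rfl

theorem pvRunA_emitB (lines : List String) :
    ∀ (ls : List String) (i s : Nat) (cl : List String),
    s ≤ i → i ≤ lines.length → lines.drop i = ls → cl = (lines.drop s).take (i - s) →
    pvRunA (i : Int) (s : Int) cl ls
      = pvEmitB lines (lines.length : Int) (s : Int) (pvHdrs (i : Int) ls) := by
  intro ls
  induction ls with
  | nil =>
    intro i s cl hsi hile hdrop hcl
    have hin : i = lines.length := by
      have := List.drop_eq_nil_iff.mp hdrop
      omega
    subst hin
    simp only [pvRunA, pvHdrs, pvEmitB]
    rw [hcl, PySem.List.slice_natCast]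
  | cons l ls ih =>
    intro i s cl hsi hile hdrop hcl
    have hlt : i < lines.length := by
      by_contra hc
      push Not at hc
      rw [List.drop_eq_nil_of_le hc] at hdrop
      simp at hdrop
    have hdrop' : lines.drop (i + 1) = ls := by
      have := congrArg (List.drop 1) hdrop
      simpa [List.drop_drop, Nat.add_comm] using this
    have hl1 : [l] = (lines.drop i).take (i + 1 - i) := by
      have : i + 1 - i = 1 := by omega
      rw [this, hdrop]
      rfl
    have hcast : ((i : Int) + 1) = ((i + 1 : Nat) : Int) := by push_cast; ring
    by_cases h : pvHdr l
    · simp only [pvRunA, pvHdrs, h, if_true, pvEmitB]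
      congr 1
      · rw [hcl, PySem.List.slice_natCast]
      · rw [hcast]
        exact ih (i+1) i [l] (by omega) (by omega) hdrop' hl1
    · simp only [pvRunA, pvHdrs, h]
      rw [hcast]
      exact ih (i+1) s (cl ++ [l]) (by omega) (by omega) hdrop'
        (by rw [hcl]; exact pvTakeSucc lines s i l ls hsi hdrop)

theorem pvPreA_emitB (lines : List String) :
    ∀ (ls : List String) (i : Nat), i ≤ lines.length → lines.drop i = ls →
    pvPreA (i : Int) ls = (match pvHdrs (i : Int) ls with
      | [] => []
      | s :: hs => pvEmitB lines (lines.length : Int) s hs) := by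
  intro ls
  induction ls with
  | nil => intro i _ _; simp [pvPreA, pvHdrs]
  | cons l ls ih =>
    intro i hile hdrop
    have hlt : i < lines.length := by
      by_contra hc
      push Not at hc
      rw [List.drop_eq_nil_of_le hc] at hdrop
      simp at hdrop
    have hdrop' : lines.drop (i + 1) = ls := by
      have := congrArg (List.drop 1) hdrop
      simpa [List.drop_drop, Nat.add_comm] using this
    have hcast : ((i : Int) + 1) = ((i + 1 : Nat) : Int) := by push_cast; ring
    by_cases h : pvHdr l
    · simp only [pvPreA, pvHdrs, h, if_true]
      rw [hcast]
      exact pvRunA_emitB lines ls (i+1) i [l] (by omega) (by omega) hdrop'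
        (by rw [show i + 1 - i = 1 from by omega, hdrop]; simp)
    · simp only [pvPreA, pvHdrs, h]
      rw [hcast]
      exact ih (i+1) (by omega) hdrop'

theorem pvMain (lines : List String) :
    pvFin (lines.length : Int) ((PySem.List.enumerate lines 0).foldl pvStepA ([], none, [])) =
    (((((PySem.List.enumerate lines 0).filter
        (fun p => PySem.Str.strip p.2 == "[[cards]]")).map (·.1)).zip
      ((((PySem.List.enumerate lines 0).filter
        (fun p => PySem.Str.strip p.2 == "[[cards]]")).map (·.1)).drop 1
        ++ [(lines.length : Int)])).foldl
      (fun blocks p =>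
        blocks ++ [(p.1, p.2 - 1, PySem.List.slice lines (some p.1) (some p.2))]) []) := by
  rw [pvFoldA_pre lines (lines.length : Int) 0 [] [] (by simp)]
  simp only [pvHdrs_eq lines 0, List.nil_append]
  have hp : pvPreA (0 : Int) lines = (match pvHdrs (0 : Int) lines with
      | [] => []
      | s :: hs => pvEmitB lines (lines.length : Int) s hs) := by
    have := pvPreA_emitB lines lines 0 (by omega) (by simp)
    simpa using this
  rw [hp]
  cases hh : pvHdrs 0 lines with
  | nil => simp
  | cons s hs =>
    rw [show List.drop 1 (s :: hs) = hs from rfl]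
    exact (pvZipFold lines (lines.length : Int) hs s).symm

-- ===== VERDICT (by name: the statement is the Claim_ definition above) =====
theorem parse_card_blocks_spec : Claim_equal_parse_card_blocks := by
  intro text _
  show parse_card_blocks text = parse_card_blocks_alt text
  unfold parse_card_blocks parse_card_blocks_alt
  exact pvMain ((PySem.Str.split? text "\n").getD [])
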